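-- pv_equiv track=rewrite | github.com/jeetswadia/CodeSignal | palindromeRearranging.py | solution
-- ===== SOURCE A (Python) =====
-- def solution(inputString):
--     string = list(inputString)
--
--     n = len(string)
--     s_set= set(string)
--
--     from collections import Counter
--
--     dic = Counter(string)
--
--     k =0
--
--     for char in s_set:
--         if dic.get(char)%2!=0:
--             k+=1
--
--     if k>1:
--         return False
--     else:
--         return True
-- ===== SOURCE B (Python) =====
-- def solution(inputString):
--     odd = set()
--     for ch in inputString:
--         if ch in odd:
--             odd.discard(ch)
--         else:
--             odd.add(ch)
--     return len(odd) <= 1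
-- ===== Notes on version B (the rewrite author's own statement) =====
-- stated objective: idiomatic
-- what changed: Replaces the Counter build plus a second scan over the set of unique characters with a single parity-toggling pass that maintains only the set of characters seen an odd number of times, ending with len(odd) <= 1.
import Mathlib
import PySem

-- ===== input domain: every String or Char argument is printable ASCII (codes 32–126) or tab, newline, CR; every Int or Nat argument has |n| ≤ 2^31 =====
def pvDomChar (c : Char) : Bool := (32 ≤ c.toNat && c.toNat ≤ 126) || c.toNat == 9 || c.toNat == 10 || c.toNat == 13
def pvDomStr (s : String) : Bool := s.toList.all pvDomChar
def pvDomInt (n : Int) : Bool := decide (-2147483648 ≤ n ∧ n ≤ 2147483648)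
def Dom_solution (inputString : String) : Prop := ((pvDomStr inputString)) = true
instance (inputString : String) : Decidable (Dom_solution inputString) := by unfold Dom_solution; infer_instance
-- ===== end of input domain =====

-- B replaces A's Counter-then-scan-the-unique-set structure with a single parity-toggling
-- pass maintaining the set of odd-count characters (objective: more idiomatic).

-- ===== PORT A =====
def solution (inputString : String) : Bool :=
  let string := inputString.toList
  let _n := string.length
  let sSet : PySem.Set Char := PySem.Set.ofList string
  let dic : PySem.Dict Char Int := PySem.Dict.counter string
  -- dic.get(char) always hits (char ∈ set(string)), so getD 0 is exact here;
  -- the fold over the set only counts, so it is independent of Python's set iteration order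
  let k : Int := sSet.foldl
    (fun k char => if PySem.Int.mod (dic.getD char 0) 2 ≠ 0 then k + 1 else k) 0
  if k > 1 then false else true

-- ===== PORT B =====
def solution_alt (inputString : String) : Bool :=
  let odd : PySem.Set Char := inputString.toList.foldl
    (fun s ch => if PySem.Set.contains s ch then PySem.Set.discard s ch else PySem.Set.add s ch)
    PySem.Set.empty
  decide (PySem.Set.len odd ≤ 1)

-- ===== PRECONDITION & SPEC =====
def Spec_solution (inputString : String) (out : Bool) : Prop := out = solution_alt inputString
instance (inputString : String) (out : Bool) : Decidable (Spec_solution inputString out) := by unfold Spec_solution; infer_instance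

-- ===== CLAIM (what is proved, stated in full; the proofs are below) =====
def Claim_equal_solution : Prop := ∀ (inputString : String), Dom_solution inputString → Spec_solution inputString (solution inputString)

-- ===== LEMMAS AND PROOFS =====

-- One toggle step of B's loop
def pvToggle (s : PySem.Set Char) (ch : Char) : PySem.Set Char :=
  if PySem.Set.contains s ch then PySem.Set.discard s ch else PySem.Set.add s ch

-- membership after one toggle step
theorem mem_pvToggle (s : PySem.Set Char) (x c : Char) :
    c ∈ pvToggle s x ↔ (if c = x then ¬ (x ∈ s) else c ∈ s) := by
  unfold pvToggle
  by_cases hx : x ∈ s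
  · rw [if_pos ((PySem.Set.contains_iff s x).mpr hx), PySem.Set.mem_discard]
    by_cases hc : c = x <;> simp [hc, hx]
  · rw [if_neg (by
      intro h
      exact hx ((PySem.Set.contains_iff s x).mp (by simpa using h))),
      PySem.Set.mem_add]
    by_cases hc : c = x <;> simp [hc, hx]

-- Invariant of the toggling pass: nodup, and membership = parity of count xor initial membership
theorem toggle_invariant (l : List Char) (s : PySem.Set Char) (hs : s.Nodup) :
    (l.foldl pvToggle s).Nodup ∧
      ∀ c, c ∈ l.foldl pvToggle s ↔ ((c ∈ s) ↔ l.count c % 2 = 0) := by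
  induction l generalizing s with
  | nil =>
    exact ⟨hs, fun c => by simp⟩
  | cons x t ih =>
    have hstep : (pvToggle s x).Nodup := by
      unfold pvToggle
      split
      · exact PySem.Set.nodup_discard _ _ hs
      · exact PySem.Set.nodup_add _ _ hs
    obtain ⟨hn, hmem⟩ := ih (pvToggle s x) hstep
    refine ⟨hn, fun c => ?_⟩
    rw [List.foldl_cons, hmem c, mem_pvToggle]
    by_cases hc : c = x
    · subst hc
      simp only [List.count_cons_self]
      by_cases hP : c ∈ s <;> simp [hP] <;> omega
    · simp [hc, Ne.symm hc]

-- the characters with odd count, as a nodup list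
def pvOddList (l : List Char) : List Char :=
  (PySem.Set.ofList l).filter (fun c => decide (l.count c % 2 = 1))

theorem toggle_length (l : List Char) :
    (l.foldl pvToggle PySem.Set.empty).length = (pvOddList l).length := by
  obtain ⟨hn, hmem⟩ := toggle_invariant l PySem.Set.empty List.nodup_nil
  have hn2 : (pvOddList l).Nodup := (PySem.Set.nodup_ofList l).filter _
  have hperm : (l.foldl pvToggle PySem.Set.empty).Perm (pvOddList l) := by
    rw [List.perm_ext_iff_of_nodup hn hn2]
    intro c
    rw [hmem c]
    unfold pvOddList
    rw [List.mem_filter, PySem.Set.mem_ofList]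
    constructor
    · intro h
      have hodd : ¬ l.count c % 2 = 0 := by
        intro h0
        exact absurd (h.mpr h0) (by simp [PySem.Set.empty])
      refine ⟨?_, by simp; omega⟩
      have : l.count c ≠ 0 := by omega
      exact List.count_pos_iff.mp (Nat.pos_of_ne_zero this)
    · intro ⟨_, h2⟩
      simp at h2
      constructor
      · intro h; cases h
      · intro h0; omega
  exact hperm.length_eq

-- A's fold over the unique characters counts exactly the odd-count characters
theorem solution_k (l : List Char) :
    (PySem.Set.ofList l).foldl
      (fun k char => if PySem.Int.mod ((PySem.Dict.counter l).getD char 0) 2 ≠ 0 then k + 1 else k)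
      (0 : Int)
    = ((pvOddList l).length : Int) := by
  have hcongr :
      (PySem.Set.ofList l).foldl
        (fun k char => if PySem.Int.mod ((PySem.Dict.counter l).getD char 0) 2 ≠ 0 then k + 1 else k)
        (0 : Int)
      = (PySem.Set.ofList l).foldl
          (fun k char => if l.count char % 2 = 1 then k + 1 else k) (0 : Int) := by
    apply PySem.List.foldl_congr_mem
    intro acc x _
    have hmod : PySem.Int.mod ((PySem.Dict.counter l).getD x 0) 2 ≠ 0 ↔ l.count x % 2 = 1 := by
      rw [PySem.Dict.getD_counter, PySem.Int.mod_eq_emod_of_pos (by norm_num)]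
      omega
    by_cases h : l.count x % 2 = 1
    · rw [if_pos h, if_pos (hmod.mpr h)]
    · rw [if_neg h, if_neg (fun hh => h (hmod.mp hh))]
  rw [hcongr, PySem.List.foldl_ite_add_one, zero_add]
  unfold pvOddList
  simp [List.countP_eq_length_filter]

theorem solution_eq_alt (inputString : String) : solution inputString = solution_alt inputString := by
  unfold solution solution_alt
  dsimp only
  rw [show (fun s ch => if s.contains ch = true then PySem.Set.discard s ch else PySem.Set.add s ch) = pvToggle from rfl]
  rw [solution_k]
  simp only [PySem.Set.len]
  simp only [toggle_length]
  by_cases h : (pvOddList inputString.toList).length ≤ 1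
  · rw [if_neg (by omega)]
    simp only [true_eq_decide_iff]
    omega
  · rw [if_pos (by omega)]
    simp only [false_eq_decide_iff]
    omega

-- ===== VERDICT (by name: the statement is the Claim_ definition above) =====
theorem solution_spec : Claim_equal_solution := by
  intro inputString _
  unfold Spec_solution
  exact solution_eq_alt inputString
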